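-- pv_equiv track=rewrite | github.com/BharatBhaskar-BB/florence-2-pwa | gdino_detector.py | _match_prompt
-- ===== SOURCE A (Python) =====
-- def _match_prompt(phrase: str, batch_prompts: list[str]) -> str:
--     """Map GDINO output phrase back to original prompt.
--
--     GDINO's phrase extraction can be partial or reordered,
--     so we try: exact → substring → fallback to raw phrase.
--     """
--     phrase_lower = phrase.lower().strip()
--     for p in batch_prompts:
--         if p.lower() == phrase_lower:
--             return p
--     for p in batch_prompts:
--         if phrase_lower in p.lower() or p.lower() in phrase_lower:
--             return p
--     return phrase
-- ===== SOURCE B (Python) =====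
-- def _match_prompt(phrase: str, batch_prompts: list[str]) -> str:
--     """Single pass: exact match returns immediately; first substring match
--     is recorded as a fallback and used only if no exact match exists."""
--     phrase_lower = phrase.lower().strip()
--     fallback = None
--     for p in batch_prompts:
--         pl = p.lower()
--         if pl == phrase_lower:
--             return p
--         if fallback is None and (phrase_lower in pl or pl in phrase_lower):
--             fallback = p
--     return fallback if fallback is not None else phrase
-- ===== Notes on version B (the rewrite author's own statement) =====
-- stated objective: alternative
-- what changed: Replaces A's two sequential scans (exact pass, then substring pass) with one pass that returns on an exact match and records the first substring match as a fallback.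
import Mathlib
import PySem

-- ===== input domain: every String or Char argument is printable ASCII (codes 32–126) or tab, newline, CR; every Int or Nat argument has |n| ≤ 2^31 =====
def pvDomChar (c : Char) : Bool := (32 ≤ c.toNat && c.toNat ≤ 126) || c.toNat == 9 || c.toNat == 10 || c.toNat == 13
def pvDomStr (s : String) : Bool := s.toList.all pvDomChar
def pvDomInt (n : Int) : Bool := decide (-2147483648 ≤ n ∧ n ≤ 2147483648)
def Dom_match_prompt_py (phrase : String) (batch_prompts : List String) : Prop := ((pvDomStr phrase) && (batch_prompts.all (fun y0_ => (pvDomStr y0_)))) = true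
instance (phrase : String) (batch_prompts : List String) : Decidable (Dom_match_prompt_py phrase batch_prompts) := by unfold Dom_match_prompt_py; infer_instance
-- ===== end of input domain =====

-- B replaces A's two sequential scans with one pass that records the first substring match as a fallback (alternative decomposition, same cost).


-- ===== PORT A =====
-- first loop of A: first p with p.lower() == phrase_lower
def matchA_exact (pl : String) : List String → Option String
  | [] => none
  | p :: rest => if PySem.Str.lower p == pl then some p else matchA_exact pl rest

-- second loop of A: first p with phrase_lower in p.lower() or p.lower() in phrase_lower
def matchA_sub (pl : String) : List String → Option String
  | [] => none
  | p :: rest =>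
      if PySem.Str.isIn pl (PySem.Str.lower p) || PySem.Str.isIn (PySem.Str.lower p) pl
      then some p else matchA_sub pl rest

def match_prompt_py (phrase : String) (batch_prompts : List String) : String :=
  let pl := PySem.Str.strip (PySem.Str.lower phrase)
  match matchA_exact pl batch_prompts with
  | some p => p
  | none =>
    match matchA_sub pl batch_prompts with
    | some p => p
    | none => phrase

-- ===== PORT B =====
-- single pass with a fallback accumulator (None until the first substring match)
def matchB_loop (pl phrase : String) (fb : Option String) : List String → String
  | [] => match fb with | some f => f | none => phrase
  | p :: rest =>
      let pll := PySem.Str.lower p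
      if pll == pl then p
      else
        matchB_loop pl phrase
          (if fb.isNone && (PySem.Str.isIn pl pll || PySem.Str.isIn pll pl) then some p else fb)
          rest

def match_prompt_py_alt (phrase : String) (batch_prompts : List String) : String :=
  matchB_loop (PySem.Str.strip (PySem.Str.lower phrase)) phrase none batch_prompts

-- ===== PRECONDITION & SPEC =====
def Spec_match_prompt_py (phrase : String) (batch_prompts : List String) (out : String) : Prop := out = match_prompt_py_alt phrase batch_prompts
instance (phrase : String) (batch_prompts : List String) (out : String) : Decidable (Spec_match_prompt_py phrase batch_prompts out) := by unfold Spec_match_prompt_py; infer_instance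

-- ===== CLAIM (what is proved, stated in full; the proofs are below) =====
def Claim_equal_match_prompt_py : Prop := ∀ (phrase : String) (batch_prompts : List String), Dom_match_prompt_py phrase batch_prompts → Spec_match_prompt_py phrase batch_prompts (match_prompt_py phrase batch_prompts)

-- ===== LEMMAS AND PROOFS =====
-- Loop invariant: B's single pass with fallback state fb computes
-- "first exact match, else fb, else first substring match, else phrase".
theorem matchB_loop_eq (pl phrase : String) (xs : List String) : ∀ (fb : Option String),
    matchB_loop pl phrase fb xs =
      match matchA_exact pl xs with
      | some p => p
      | none =>
        match fb with
        | some f => f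
        | none => match matchA_sub pl xs with | some p => p | none => phrase := by
  induction xs with
  | nil => intro fb; cases fb <;> rfl
  | cons p rest ih =>
    intro fb
    simp only [matchB_loop, matchA_exact, matchA_sub]
    by_cases hx : (PySem.Str.lower p == pl) = true
    · rw [if_pos hx, if_pos hx]
    · rw [if_neg hx, if_neg hx, ih]
      cases fb with
      | some f =>
        simp only [Option.isNone_some, Bool.false_and, Bool.false_eq_true, if_false]
      | none =>
        simp only [Option.isNone_none, Bool.true_and]
        by_cases hs : (PySem.Str.isIn pl (PySem.Str.lower p) || PySem.Str.isIn (PySem.Str.lower p) pl) = true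
        · rw [if_pos hs, if_pos hs]
        · rw [if_neg hs, if_neg hs]

-- ===== VERDICT (by name: the statement is the Claim_ definition above) =====
theorem match_prompt_py_spec : Claim_equal_match_prompt_py := by
  intro phrase batch_prompts _
  unfold Spec_match_prompt_py match_prompt_py match_prompt_py_alt
  rw [matchB_loop_eq]
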